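-- pv_equiv track=rewrite | github.com/Atsuto0519/Fourier-Transform_byPython | FFT.py | BIT_REVERSE
-- ===== SOURCE A (Python) =====
-- def BIT_REVERSE(i,N) :
--     """
--     概要:　   高速フーリエ変換のための並び替えビット反転
--     @param i:変換前信号i番目
--     @return :変換後信号i番目
--     """
--
--     res = 0
--
--     N-=1
--     while (N > 0) :
--         res = (res << 1) | (i & 1)
--
--         N >>= 1
--         i >>= 1
--
--     return res
-- ===== SOURCE B (Python) =====
-- def BIT_REVERSE(i, N):
--     """Bit-reverse i within the bit-width of N-1: format the masked value as a
--     zero-padded binary string and re-assemble it with reversed bit positions."""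
--     N -= 1
--     if N <= 0:
--         return 0
--     w = N.bit_length()
--     s = format(i % (1 << w), '0{}b'.format(w))
--     res = 0
--     for k, c in enumerate(s):
--         if c == '1':
--             res += 1 << k
--     return res
-- ===== Notes on version B (the rewrite author's own statement) =====
-- stated objective: idiomatic
-- what changed: Replaces A's triple-mutation shift-and-or while loop with: compute the width w=(N-1).bit_length() once, mask i with i % (1<<w), format that to a zero-padded w-char binary string, and assemble the reversed value by adding 1<<k for each '1' at string index k.
import Mathlib
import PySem

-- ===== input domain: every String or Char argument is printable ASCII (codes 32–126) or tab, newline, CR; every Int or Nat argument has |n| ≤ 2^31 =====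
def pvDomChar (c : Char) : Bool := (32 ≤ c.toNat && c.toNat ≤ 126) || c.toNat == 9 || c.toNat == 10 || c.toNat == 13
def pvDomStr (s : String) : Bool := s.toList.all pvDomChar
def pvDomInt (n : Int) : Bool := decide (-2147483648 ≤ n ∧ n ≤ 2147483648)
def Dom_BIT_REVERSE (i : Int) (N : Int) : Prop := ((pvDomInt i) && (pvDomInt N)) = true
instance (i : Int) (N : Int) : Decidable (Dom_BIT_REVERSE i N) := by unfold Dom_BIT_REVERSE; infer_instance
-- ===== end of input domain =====

-- B replaces A's shift-and-or while loop by: width = (N-1).bit_length(), mask i, format to a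
-- zero-padded binary string, re-assemble with reversed bit positions (idiomatic; same cost).

-- ===== PORT A =====
-- 'while N > 0: res = (res << 1) | (i & 1); N >>= 1; i >>= 1'
def bitrevLoop (res : Int) (i : Int) (N : Int) : Int :=
  if 0 < N then
    bitrevLoop (PySem.Int.bor (res <<< (1:Nat)) (PySem.Int.band i 1)) (i >>> (1:Nat)) (N >>> (1:Nat))
  else res
termination_by N.toNat
decreasing_by
  have h2 : N >>> (1:Nat) = N / 2 := by simpa using Int.shiftRight_eq_div_pow N 1
  rw [h2]; omega

def BIT_REVERSE (i : Int) (N : Int) : Int :=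
  bitrevLoop 0 i (N - 1)

-- ===== PORT B =====
def BIT_REVERSE_alt (i : Int) (N : Int) : Int :=
  let N' := N - 1
  if N' ≤ 0 then 0
  else
    let w := PySem.Int.bitLength N'                      -- N.bit_length() after N -= 1
    let m := PySem.Int.mod i ((1:Int) <<< w)             -- i % (1 << w)
    let b := PySem.Int.toBinChars m                      -- format(m, 'b')
    let s := List.replicate (w - b.length) '0' ++ b      -- zero-pad to width w ('0{w}b')
    -- for k, c in enumerate(s): if c == '1': res += 1 << k
    -- (enumerate yields k ≥ 0 always, so '1 << k' is exactly (1:Int) <<< k.toNat)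
    (PySem.List.enumerate s).foldl
      (fun res kc => if kc.2 = '1' then res + ((1:Int) <<< kc.1.toNat) else res) 0

-- ===== PRECONDITION & SPEC =====
def Spec_BIT_REVERSE (i : Int) (N : Int) (out : Int) : Prop := out = BIT_REVERSE_alt i N
instance (i : Int) (N : Int) (out : Int) : Decidable (Spec_BIT_REVERSE i N out) := by unfold Spec_BIT_REVERSE; infer_instance

-- ===== CLAIM (what is proved, stated in full; the proofs are below) =====
def Claim_equal_BIT_REVERSE : Prop := ∀ (i : Int) (N : Int), Dom_BIT_REVERSE i N → Spec_BIT_REVERSE i N (BIT_REVERSE i N)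

-- ===== LEMMAS AND PROOFS =====

-- reference bit-reversal: w rounds of 'res := 2*res + (i mod 2); i := i / 2'
def pvG : Nat → Int → Int → Int
  | 0, res, _ => res
  | w+1, res, i => pvG w (2*res + i % 2) (i / 2)

-- value of a binary string read with reversed bit positions (index k gets weight 2^k)
def pvValRec : List Char → Int
  | [] => 0
  | c :: t => (if c = '1' then 1 else 0) + 2 * pvValRec t

theorem pv_or_step (res b : Int) (hres : 0 ≤ res) (hb : b = 0 ∨ b = 1) :
    PySem.Int.bor (res <<< (1:Nat)) b = 2*res + b := by
  have hs : res <<< (1:Nat) = 2*res := by rw [Int.shiftLeft_eq]; ring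
  rcases hb with h | h <;> subst h
  · simp [hs, PySem.Int.bor_zero]
  · rw [hs, PySem.Int.bor_of_nonneg (by omega) (by omega)]
    have h1 : (2*res).toNat = 2*res.toNat := by omega
    have h2 : (1:Int).toNat = 1 := rfl
    rw [h1, h2]
    have h3 : 2*res.toNat ||| 1 = 2*res.toNat + 1 := by
      have h := Nat.lor_bit false res.toNat true 0
      simp [Nat.bit] at h
      omega
    rw [h3]; omega

theorem pv_loop_step (res i N : Int) (hres : 0 ≤ res) (hN : 0 < N) :
    bitrevLoop res i N = bitrevLoop (2*res + i % 2) (i / 2) (N / 2) := by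
  rw [bitrevLoop, if_pos hN]
  have hb : PySem.Int.band i 1 = i % 2 := by
    rw [PySem.Int.band_one, PySem.Int.mod_eq_emod_of_pos (by omega)]
  have hsh : ∀ x : Int, x >>> (1:Nat) = x / 2 := fun x => by
    simpa using Int.shiftRight_eq_div_pow x 1
  rw [hb, pv_or_step res _ hres (by omega), hsh, hsh]

theorem pv_loop_eq_G (n : Nat) : ∀ (N : Int), N.toNat = n → 0 ≤ N → ∀ (res i : Int), 0 ≤ res →
    bitrevLoop res i N = pvG (PySem.Int.bitLength N) res i := by
  induction n using Nat.strong_induction_on with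
  | _ n ih =>
    intro N hn hN0 res i hres
    by_cases hN : 0 < N
    · rw [pv_loop_step res i N hres hN]
      have hbl := PySem.Int.bitLength_of_pos (n := N) hN
      have hfd : PySem.Int.floordiv N 2 = N / 2 := PySem.Int.floordiv_eq_ediv_of_pos (by omega)
      rw [hbl, hfd]
      have hlt : (N / 2).toNat < n := by omega
      have hres' : 0 ≤ 2*res + i % 2 := by
        have := Int.emod_nonneg i (by norm_num : (2:Int) ≠ 0); omega
      rw [ih _ hlt (N/2) rfl (by omega) (2*res + i % 2) (i/2) hres']
      rfl
    · have : N = 0 := by omega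
      subst this
      rw [bitrevLoop]
      simp [PySem.Int.bitLength_zero, pvG]

theorem pv_G_scale (w : Nat) : ∀ (res i : Int), pvG w res i = res * 2^w + pvG w 0 i := by
  induction w with
  | zero => intro res i; simp [pvG]
  | succ w ih =>
    intro res i
    show pvG w (2*res + i % 2) (i/2) = res * 2^(w+1) + pvG w (2*0 + i % 2) (i/2)
    rw [ih (2*res + i % 2), ih (2*0 + i % 2)]
    ring

theorem pv_div2_mod (i K : Int) (hK : 0 < K) : (i/2) % K = (i % (2*K)) / 2 := by
  conv_lhs => rw [← Int.mul_ediv_add_emod i (2*K)]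
  have hr0 : 0 ≤ i % (2*K) := Int.emod_nonneg _ (by omega)
  have hr1 : i % (2*K) < 2*K := Int.emod_lt_of_pos _ (by omega)
  set q := i / (2*K)
  set r := i % (2*K)
  have h1 : (2*K*q + r)/2 = r/2 + K*q := by
    rw [show 2*K*q + r = r + 2*(K*q) by ring, Int.add_mul_ediv_left _ _ (by omega : (2:Int) ≠ 0)]
  rw [h1, Int.add_mul_emod_self_left, Int.emod_eq_of_lt (by omega) (by omega)]

theorem pv_G_congr (w : Nat) : ∀ (res i j : Int), i % (2:Int)^w = j % (2:Int)^w →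
    pvG w res i = pvG w res j := by
  induction w with
  | zero => intro res i j _; rfl
  | succ w ih =>
    intro res i j h
    have h2 : (2:Int)^(w+1) = 2*2^w := by ring
    have hdvd : (2:Int) ∣ 2^(w+1) := ⟨2^w, by ring⟩
    have hm : i % 2 = j % 2 := by
      rw [← Int.emod_emod_of_dvd i hdvd, ← Int.emod_emod_of_dvd j hdvd, h]
    have hd : (i/2) % (2:Int)^w = (j/2) % (2:Int)^w := by
      rw [pv_div2_mod i _ (by positivity), pv_div2_mod j _ (by positivity), ← h2, h]
    show pvG w (2*res + i % 2) (i/2) = pvG w (2*res + j % 2) (j/2)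
    rw [hm]
    exact ih _ _ _ hd

theorem pv_fold_enum (s : List Char) : ∀ (n : Nat) (res : Int),
    (PySem.List.enumerate s (n : Int)).foldl
      (fun res kc => if kc.2 = '1' then res + ((1:Int) <<< kc.1.toNat) else res) res
    = res + 2^n * pvValRec s := by
  induction s with
  | nil => intro n res; simp [PySem.List.enumerate, pvValRec]
  | cons c t ih =>
    intro n res
    simp only [PySem.List.enumerate, List.foldl]
    rw [show ((n:Int)) + 1 = ((n+1 : Nat) : Int) by push_cast; ring]
    rw [ih (n+1)]
    have ht : ((n:Int)).toNat = n := by omega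
    by_cases hc : c = '1'
    · simp only [hc, reduceIte, pvValRec, ht]
      rw [Int.shiftLeft_eq_mul_pow]
      push_cast
      ring
    · simp only [pvValRec, if_neg hc]
      ring

theorem pv_valRec_append (s : List Char) (c : Char) :
    pvValRec (s ++ [c]) = pvValRec s + (if c = '1' then 1 else 0) * 2^s.length := by
  induction s with
  | nil => simp [pvValRec]
  | cons d t ih =>
    simp only [List.cons_append, pvValRec, ih, List.length_cons]
    by_cases hc : c = '1' <;> simp [hc] <;> try ring

theorem pv_pad_step (w m : Nat) (hw : 1 ≤ w) (hm : m < 2^(w+1)) :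
    List.replicate ((w+1) - (Nat.toDigits 2 m).length) '0' ++ Nat.toDigits 2 m
    = (List.replicate (w - (Nat.toDigits 2 (m/2)).length) '0' ++ Nat.toDigits 2 (m/2))
      ++ [(m % 2).digitChar] := by
  by_cases h2 : m < 2
  · have hd : Nat.toDigits 2 m = [m.digitChar] := Nat.toDigits_of_lt_base h2
    have hd0 : m / 2 = 0 := by omega
    have hmod : m % 2 = m := Nat.mod_eq_of_lt h2
    rw [hd, hd0, Nat.toDigits_zero, hmod]
    simp only [List.length_cons, List.length_nil]
    have hrep : List.replicate w '0' = List.replicate (w-1) '0' ++ ['0'] := by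
      conv_lhs => rw [show w = (w-1)+1 by omega]
      exact List.replicate_succ' ..
    rw [show w + 1 - (0+1) = w by omega, hrep, show w - (0+1) = w-1 by omega, List.append_assoc]
  · have hd : Nat.toDigits 2 m = Nat.toDigits 2 (m/2) ++ [(m % 2).digitChar] := by
      rw [Nat.toDigits_eq_if (by norm_num)]
      simp [h2]
    have hlen : (Nat.toDigits 2 (m/2)).length ≤ w :=
      (Nat.length_toDigits_le_iff (by norm_num) (by omega)).2 (by
        have : 2^(w+1) = 2*2^w := by ring
        omega)
    rw [hd]
    simp only [List.length_append, List.length_cons, List.length_nil]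
    rw [show (w+1) - ((Nat.toDigits 2 (m/2)).length + (0+1)) = w - (Nat.toDigits 2 (m/2)).length by omega]
    simp [List.append_assoc]

theorem pv_pad_len (w m : Nat) (hw : 0 < w) (hm : m < 2^w) :
    (List.replicate (w - (Nat.toDigits 2 m).length) '0' ++ Nat.toDigits 2 m).length = w := by
  have hlen : (Nat.toDigits 2 m).length ≤ w :=
    (Nat.length_toDigits_le_iff (by norm_num) hw).2 hm
  simp [List.length_append, List.length_replicate]
  omega

theorem pv_val_pad (w : Nat) (hw : 1 ≤ w) : ∀ (m : Nat), m < 2^w →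
    pvValRec (List.replicate (w - (Nat.toDigits 2 m).length) '0' ++ Nat.toDigits 2 m)
    = pvG w 0 (m : Int) := by
  induction w, hw using Nat.le_induction with
  | base =>
    intro m hm
    interval_cases m <;> decide
  | succ w hw ih =>
    intro m hm
    rw [pv_pad_step w m hw hm, pv_valRec_append]
    rw [pv_pad_len w (m/2) (by omega) (by (have : 2^(w+1) = 2*2^w := by ring); omega)]
    rw [ih (m/2) (by (have : 2^(w+1) = 2*2^w := by ring); omega)]
    have hbit : (if (m % 2).digitChar = '1' then (1:Int) else 0) = ((m % 2 : Nat) : Int) := by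
      have h2 : m % 2 = 0 ∨ m % 2 = 1 := by omega
      rcases h2 with h | h <;> rw [h] <;> decide
    rw [hbit]
    show _ = pvG w (2*0 + (m:Int) % 2) ((m:Int)/2)
    rw [pv_G_scale w (2*0 + (m:Int) % 2)]
    have hc1 : ((m:Int))/2 = ((m/2 : Nat) : Int) := by omega
    have hc2 : ((m:Int)) % 2 = ((m % 2 : Nat) : Int) := by omega
    rw [hc1, hc2]
    ring

theorem pv_eq (i N : Int) : BIT_REVERSE i N = BIT_REVERSE_alt i N := by
  unfold BIT_REVERSE BIT_REVERSE_alt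
  by_cases h : N - 1 ≤ 0
  · rw [if_pos h, bitrevLoop, if_neg (by omega)]
  · rw [if_neg h]
    have hA : bitrevLoop 0 i (N-1) = pvG (PySem.Int.bitLength (N-1)) 0 i :=
      pv_loop_eq_G (N-1).toNat (N-1) rfl (by omega) 0 i le_rfl
    rw [hA]
    dsimp only
    set w := PySem.Int.bitLength (N-1) with hw
    have hw1 : 1 ≤ w := by
      rw [hw, PySem.Int.bitLength_of_pos (by omega : (0:Int) < N-1)]; omega
    have hplt : ((1:Int) <<< w) = 2^w := by rw [Int.shiftLeft_eq]; ring
    have hpow : (0:Int) < 2^w := by positivity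
    have hm : PySem.Int.mod i ((1:Int) <<< w) = i % 2^w := by
      rw [hplt, PySem.Int.mod_eq_emod_of_pos hpow]
    rw [hm]
    have hm0 : 0 ≤ i % 2^w := Int.emod_nonneg _ (by omega)
    have hmlt : i % 2^w < 2^w := Int.emod_lt_of_pos _ hpow
    have hb : PySem.Int.toBinChars (i % 2^w) = Nat.toDigits 2 (i % 2^w).toNat := by
      rw [PySem.Int.toBinChars, if_neg (by omega)]
    rw [hb]
    have hfold := pv_fold_enum
      (List.replicate (w - (Nat.toDigits 2 (i % 2^w).toNat).length) '0'
        ++ Nat.toDigits 2 (i % 2^w).toNat) 0 0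
    rw [show ((0:Nat):Int) = (0:Int) from rfl] at hfold
    rw [hfold]
    have hlt : (i % 2^w).toNat < 2^w := by
      have : ((2^w : Nat) : Int) = (2:Int)^w := by push_cast; rfl
      omega
    rw [pv_val_pad w hw1 (i % 2^w).toNat hlt]
    have hcast : (((i % 2^w).toNat : Nat) : Int) = i % 2^w := by omega
    rw [hcast]
    rw [pv_G_congr w 0 i (i % 2^w) (Int.emod_emod_of_dvd i dvd_rfl).symm]
    ring

-- ===== VERDICT (by name: the statement is the Claim_ definition above) =====
theorem BIT_REVERSE_spec : Claim_equal_BIT_REVERSE := by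
  intro i N _
  unfold Spec_BIT_REVERSE
  exact pv_eq i N
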